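-- pv_equiv track=rewrite | github.com/dsuzuki8969-dev/keiba-v3 | scripts/backfill_race_log_corners_from_results.py | _parse_corners_num
-- ===== SOURCE A (Python) =====
-- def _parse_corners_num(raw_val: int, field_count: int) -> list:
--     """netkeibaの通過順数値(例: 3333→[3,3,3,3])をパース"""
--     if not raw_val or raw_val == 0:
--         return []
--     s = str(raw_val)
--     # 全桁1-9 かつ 2-4桁 → 各桁分解で確定
--     if all(c in "123456789" for c in s) and 2 <= len(s) <= 4:
--         return [int(c) for c in s]
--     # 1桁+2桁混在: コーナー数4→3→2で試行
--     for nc in (4, 3, 2):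
--         cands = _dp_corners(s, nc)
--         if not cands:
--             continue
--         valid = [c for c in cands if all(1 <= v <= field_count for v in c)]
--         if valid:
--             return min(valid, key=lambda c: max(c) - min(c))
--     return [int(c) for c in s if c != "0"]
--
-- def _dp_corners(s: str, n: int):
--     """文字列sをn個の正整数に分割する全パターンを列挙"""
--     if n == 0:
--         return [[]] if not s else None
--     if not s:
--         return None
--     res = []
--     v1 = int(s[0])
--     if v1 > 0:
--         sub = _dp_corners(s[1:], n - 1)
--         if sub:
--             res.extend([[v1] + r for r in sub])
--     if len(s) >= 2:
--         v2 = int(s[:2])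
--         if v2 >= 10:
--             sub = _dp_corners(s[2:], n - 1)
--             if sub:
--                 res.extend([[v2] + r for r in sub])
--     return res or None
-- ===== SOURCE B (Python) =====
-- def _parse_corners_num(raw_val: int, field_count: int) -> list:
--     """netkeiba passing-order integer -> corner positions (iterative frontier version)"""
--     if not raw_val:
--         return []
--     s = str(raw_val)
--     if 2 <= len(s) <= 4 and all("1" <= c <= "9" for c in s):
--         return [int(c) for c in s]
--     for nc in (4, 3, 2):
--         valid = [c for c in _enum_splits(s, nc)
--                  if all(1 <= v <= field_count for v in c)]
--         if valid:
--             return min(valid, key=lambda c: max(c) - min(c))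
--     return [int(c) for c in s if c != "0"]
--
-- def _enum_splits(s, n):
--     """All splits of s into n positive integers (each 1 digit 1-9 or 2 digits >= 10),
--     enumerated by level-by-level frontier expansion in DFS (lexicographic) order."""
--     L = len(s)
--     frontier = [(0, [])]
--     for _ in range(n):
--         nxt = []
--         for i, acc in frontier:
--             if i < L and "1" <= s[i] <= "9":
--                 nxt.append((i + 1, acc + [int(s[i])]))
--                 if i + 2 <= L:
--                     nxt.append((i + 2, acc + [int(s[i:i + 2])]))
--         frontier = nxt
--     return [acc for i, acc in frontier if i == L]
-- ===== Notes on version B (the rewrite author's own statement) =====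
-- stated objective: alternative
-- what changed: The recursive depth-first _dp_corners split enumeration is replaced by an iterative level-by-level frontier (worklist) expansion that extends each partial split by a 1-digit then a 2-digit part, yielding the same candidate list in the same order; the outer guard/fast-path/nc-loop structure is kept.
import Mathlib
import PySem

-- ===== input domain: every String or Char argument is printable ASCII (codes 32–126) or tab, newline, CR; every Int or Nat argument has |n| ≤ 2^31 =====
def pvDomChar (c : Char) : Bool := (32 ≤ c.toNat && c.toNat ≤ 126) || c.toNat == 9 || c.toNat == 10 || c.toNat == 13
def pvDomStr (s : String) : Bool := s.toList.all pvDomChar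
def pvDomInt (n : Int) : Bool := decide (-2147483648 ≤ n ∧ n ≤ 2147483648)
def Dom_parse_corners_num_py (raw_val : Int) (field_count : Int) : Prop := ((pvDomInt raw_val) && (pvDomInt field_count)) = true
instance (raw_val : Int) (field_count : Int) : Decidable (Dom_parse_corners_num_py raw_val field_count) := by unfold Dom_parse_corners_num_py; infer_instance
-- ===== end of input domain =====

-- B replaces the recursive depth-first _dp_corners enumeration by an iterative level-by-level
-- frontier (worklist) expansion producing the same candidate list in the same order (objective:
-- alternative decomposition, no speed claim).

-- ===== PORT A =====
-- int(c) for a digit character c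
def digitVal (c : Char) : Int := (c.toNat : Int) - 48

-- _dp_corners: none = Python's None, some res with res ≠ [] otherwise.
-- `if sub: res.extend([[v] + r for r in sub])` is extendAll (extending by nothing when sub is
-- None or empty); recursion is structured on the part count n, which each call decrements.
def extendAll (sub : Option (List (List Int))) (v : Int) : List (List Int) :=
  match sub with
  | some sub => sub.map (fun r => v :: r)
  | none => []

def dpAgo : Nat → List Char → Option (List (List Int))
  | 0, s => if s = [] then some [[]] else none
  | _ + 1, [] => none
  | n + 1, c1 :: rest =>
    let v1 := digitVal c1
    let res1 : List (List Int) := if 0 < v1 then extendAll (dpAgo n rest) v1 else []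
    let res2 : List (List Int) :=
      match rest with
      | [] => []
      | c2 :: rest2 =>
        let v2 := 10 * v1 + digitVal c2
        if 10 ≤ v2 then extendAll (dpAgo n rest2) v2 else []
    let res := res1 ++ res2
    if res = [] then none else some res

def dpA (s : List Char) (n : Nat) : Option (List (List Int)) := dpAgo n s

-- key=lambda c: max(c) - min(c)
def spreadKey (c : List Int) : Int :=
  ((PySem.List.max? c (fun v => v)).getD 0) - ((PySem.List.min? c (fun v => v)).getD 0)

-- one iteration of A's `for nc in (4, 3, 2)` body: some r = "return r", none = "continue"
def tryA (s : List Char) (fc : Int) (nc : Nat) : Option (List Int) :=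
  match dpA s nc with
  | none => none
  | some cands =>
    let valid := cands.filter (fun c => c.all (fun v => decide (1 ≤ v) && decide (v ≤ fc)))
    if valid = [] then none
    else PySem.List.min? valid spreadKey

def parse_corners_num_py (raw_val : Int) (field_count : Int) : List Int :=
  if raw_val = 0 then []
  else
    let s := PySem.Int.toChars raw_val
    -- `c in "123456789"` for a single character c is exactly membership in its character list
    if s.all (fun c => ("123456789".toList).contains c) && (decide (2 ≤ s.length) && decide (s.length ≤ 4)) then
      s.map digitVal
    else
      match tryA s field_count 4 with
      | some r => r
      | none =>
        match tryA s field_count 3 with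
        | some r => r
        | none =>
          match tryA s field_count 2 with
          | some r => r
          | none => (s.filter (fun c => c ≠ '0')).map digitVal

-- ===== PORT B =====
-- one frontier-expansion level of _enum_splits: each partial split (i, acc) is extended by a
-- 1-digit part (first) and, when two characters remain, a 2-digit part
def stepB (s : List Char) (fr : List (Nat × List Int)) : List (Nat × List Int) :=
  fr.flatMap (fun p =>
    match s.drop p.1 with
    | [] => []
    | c1 :: rest =>
      if ('1' ≤ c1 && c1 ≤ '9') then
        (p.1 + 1, p.2 ++ [digitVal c1]) ::
          (match rest with
           | [] => []
           | c2 :: _ => [(p.1 + 2, p.2 ++ [10 * digitVal c1 + digitVal c2])])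
      else [])

-- _enum_splits: n frontier levels, then keep the splits that consumed all of s
def enumB (s : List Char) (n : Nat) : List (List Int) :=
  ((List.range n).foldl (fun fr _ => stepB s fr) [(0, [])]).filterMap
    (fun p => if p.1 = s.length then some p.2 else none)

-- B's `for nc in (4, 3, 2)` loop with early return; the final [] case is the fallback line
def loopB (s : List Char) (fc : Int) : List Nat → List Int
  | [] => (s.filter (fun c => c ≠ '0')).map digitVal
  | nc :: more =>
    let valid := (enumB s nc).filter (fun c => c.all (fun v => decide (1 ≤ v) && decide (v ≤ fc)))
    match PySem.List.min? valid spreadKey with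
    | some m => m
    | none => loopB s fc more

def parse_corners_num_py_alt (raw_val : Int) (field_count : Int) : List Int :=
  if raw_val = 0 then []
  else
    let s := PySem.Int.toChars raw_val
    if (decide (2 ≤ s.length) && decide (s.length ≤ 4)) && s.all (fun c => '1' ≤ c && c ≤ '9') then
      s.map digitVal
    else loopB s field_count [4, 3, 2]

-- ===== PRECONDITION & SPEC =====
-- Pre_ excludes exactly the inputs where A raises: for raw_val < 0, str(raw_val) starts with '-'
-- and _dp_corners calls int('-'), a ValueError.
def Pre_parse_corners_num_py (raw_val : Int) (field_count : Int) : Prop := 0 ≤ raw_val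
instance (raw_val : Int) (field_count : Int) : Decidable (Pre_parse_corners_num_py raw_val field_count) := by unfold Pre_parse_corners_num_py; infer_instance

def pvWitness_parse_corners_num_py : Int × Int := (31215, 18)

def Spec_parse_corners_num_py (raw_val : Int) (field_count : Int) (out : List Int) : Prop := out = parse_corners_num_py_alt raw_val field_count
instance (raw_val : Int) (field_count : Int) (out : List Int) : Decidable (Spec_parse_corners_num_py raw_val field_count out) := by unfold Spec_parse_corners_num_py; infer_instance

-- ===== CLAIM (what is proved, stated in full; the proofs are below) =====
def Claim_equal_parse_corners_num_py : Prop := ∀ (raw_val : Int) (field_count : Int), Dom_parse_corners_num_py raw_val field_count → Pre_parse_corners_num_py raw_val field_count → Spec_parse_corners_num_py raw_val field_count (parse_corners_num_py raw_val field_count)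

-- ===== LEMMAS AND PROOFS =====

-- a character is a decimal digit: 48 ≤ code ≤ 57
def isDig (c : Char) : Prop := 48 ≤ c.toNat ∧ c.toNat ≤ 57

theorem char_le_iff (a b : Char) : a ≤ b ↔ a.toNat ≤ b.toNat := by
  rw [Char.le_def]; exact ⟨fun h => h, fun h => h⟩

theorem digitChar_digit (m : Nat) (h : m < 10) : isDig (Nat.digitChar m) := by
  interval_cases m <;> exact ⟨by decide, by decide⟩

theorem toDigitsCore_digits (f : Nat) : ∀ (n : Nat) (l : List Char),
    (∀ c ∈ l, isDig c) → ∀ c ∈ Nat.toDigitsCore 10 f n l, isDig c := by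
  induction f with
  | zero =>
    intro n l hl c hc
    rw [Nat.toDigitsCore] at hc
    exact hl c hc
  | succ f ih =>
    intro n l hl c hc
    rw [Nat.toDigitsCore] at hc
    have hd : ∀ c ∈ (Nat.digitChar (n % 10)) :: l, isDig c := by
      intro c hc
      rcases List.mem_cons.mp hc with h | h
      · subst h; exact digitChar_digit _ (Nat.mod_lt _ (by omega))
      · exact hl c h
    by_cases h0 : n / 10 = 0
    · rw [if_pos h0] at hc
      exact hd c hc
    · rw [if_neg h0] at hc
      exact ih (n / 10) _ hd c hc

theorem toChars_digits (n : Int) (hn : 0 ≤ n) : ∀ c ∈ PySem.Int.toChars n, isDig c := by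
  intro c hc
  rw [PySem.Int.toChars] at hc
  rw [if_neg (by omega)] at hc
  exact toDigitsCore_digits _ _ _ (by intro c hc; simp at hc) c hc

-- iterated frontier expansion (proof-only view of enumB's fold)
def iterStep (s : List Char) : Nat → List (Nat × List Int) → List (Nat × List Int)
  | 0, fr => fr
  | n + 1, fr => iterStep s n (stepB s fr)

theorem iterStep_out (s : List Char) (n : Nat) (fr : List (Nat × List Int)) :
    iterStep s (n + 1) fr = stepB s (iterStep s n fr) := by
  induction n generalizing fr with
  | zero => rfl
  | succ n ih => rw [iterStep, ih, iterStep]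

theorem foldl_range_iter (s : List Char) (n : Nat) (fr : List (Nat × List Int)) :
    (List.range n).foldl (fun fr _ => stepB s fr) fr = iterStep s n fr := by
  induction n with
  | zero => rfl
  | succ n ih => rw [List.range_succ, List.foldl_append, ih, List.foldl_cons, List.foldl_nil,
      ← iterStep_out]

theorem stepB_append (s : List Char) (a b : List (Nat × List Int)) :
    stepB s (a ++ b) = stepB s a ++ stepB s b := by
  simp [stepB]

theorem iterStep_append (s : List Char) (n : Nat) (a b : List (Nat × List Int)) :
    iterStep s n (a ++ b) = iterStep s n a ++ iterStep s n b := by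
  induction n generalizing a b with
  | zero => rfl
  | succ n ih => rw [iterStep, stepB_append, ih, iterStep, iterStep]

theorem iterStep_nil (s : List Char) (n : Nat) : iterStep s n [] = [] := by
  induction n with
  | zero => rfl
  | succ n ih => rw [iterStep]; simpa [stepB] using ih

-- dpA's candidate list with None read as []
def dpC (s : List Char) (n : Nat) : List (List Int) := (dpAgo n s).getD []

theorem extendAll_dpC (t : List Char) (n : Nat) (v : Int) :
    extendAll (dpAgo n t) v = (dpC t n).map (fun r => v :: r) := by
  unfold dpC; cases dpAgo n t <;> simp [extendAll]

theorem dpC_cons (c1 : Char) (rest : List Char) (n : Nat) :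
    dpC (c1 :: rest) (n + 1) =
      (if 0 < digitVal c1 then (dpC rest n).map (fun r => digitVal c1 :: r) else []) ++
      (match rest with
       | [] => []
       | c2 :: rest2 =>
         if 10 ≤ 10 * digitVal c1 + digitVal c2 then
           (dpC rest2 n).map (fun r => (10 * digitVal c1 + digitVal c2) :: r)
         else []) := by
  show ((dpAgo (n + 1) (c1 :: rest)).getD []) = _
  rw [dpAgo.eq_def]
  simp only [extendAll_dpC]
  by_cases h : ((if 0 < digitVal c1 then (dpC rest n).map (fun r => digitVal c1 :: r) else []) ++
      (match rest with
       | [] => []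
       | c2 :: rest2 =>
         if 10 ≤ 10 * digitVal c1 + digitVal c2 then
           (dpC rest2 n).map (fun r => (10 * digitVal c1 + digitVal c2) :: r)
         else [])) = []
  · rw [if_pos h, h]
    rfl
  · rw [if_neg h]
    rfl

-- the main invariant: expanding one partial split (i, acc) for n more levels and keeping the
-- complete splits yields exactly dpA's candidates for s.drop i, each prefixed with acc
theorem frontier_eq_dp (s : List Char) (hd : ∀ c ∈ s, isDig c) :
    ∀ (n : Nat) (i : Nat) (acc : List Int), i ≤ s.length →
    (iterStep s n [(i, acc)]).filterMap
        (fun p => if p.1 = s.length then some p.2 else none)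
      = (dpC (s.drop i) n).map (fun r => acc ++ r) := by
  intro n
  induction n with
  | zero =>
    intro i acc hi
    by_cases h : i = s.length
    · subst h
      simp [iterStep, dpC, dpAgo]
    · have hne : s.drop i ≠ [] := by
        rw [ne_eq, List.drop_eq_nil_iff]; omega
      simp [iterStep, h, dpC, dpAgo, hne]
  | succ n ih =>
    intro i acc hi
    rw [iterStep]
    rcases hdrop : s.drop i with _ | ⟨c1, rest⟩
    · -- nothing left to consume but parts remain
      have hstep : stepB s [(i, acc)] = [] := by simp [stepB, hdrop]
      rw [hstep, iterStep_nil]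
      simp [dpC, dpAgo]
    · have hiL : i < s.length := by
        by_contra h
        rw [List.drop_eq_nil_iff.mpr (by omega)] at hdrop; exact absurd hdrop (by simp)
      have hc1 : isDig c1 := hd c1 (List.mem_of_mem_drop (hdrop ▸ List.mem_cons_self ..))
      have hrest : s.drop (i + 1) = rest := by rw [← List.tail_drop, hdrop]; rfl
      by_cases hg : 49 ≤ c1.toNat
      · have hle1 : '1' ≤ c1 := (char_le_iff _ _).mpr hg
        have hle9 : c1 ≤ '9' := (char_le_iff _ _).mpr hc1.2
        have hv1 : 0 < digitVal c1 := by unfold digitVal; omega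
        rcases rest with _ | ⟨c2, rest2⟩
        · -- only the single-digit child
          have hstep : stepB s [(i, acc)] = [(i + 1, acc ++ [digitVal c1])] := by
            simp [stepB, hdrop, hle1, hle9]
          rw [hstep, ih (i + 1) (acc ++ [digitVal c1]) (by omega), hrest, dpC_cons, if_pos hv1]
          simp [List.append_assoc]
        · have hc2 : isDig c2 := hd c2 ((show c2 ∈ s from List.mem_of_mem_drop (i := i) (by rw [hdrop]; exact List.mem_cons_of_mem _ List.mem_cons_self)))
          have hrest2 : s.drop (i + 2) = rest2 := by
            rw [show i + 2 = (i + 1) + 1 from rfl, ← List.tail_drop, hrest]; rfl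
          have hi2 : i + 2 ≤ s.length := by
            by_contra h
            have he : s.drop (i + 1) = [] := List.drop_eq_nil_iff.mpr (by omega)
            rw [hrest] at he; exact absurd he (by simp)
          have hstep : stepB s [(i, acc)] =
              [(i + 1, acc ++ [digitVal c1])] ++
              [(i + 2, acc ++ [10 * digitVal c1 + digitVal c2])] := by
            simp [stepB, hdrop, hle1, hle9]
          rw [hstep, iterStep_append, List.filterMap_append,
            ih (i + 1) _ (by omega), ih (i + 2) _ hi2, hrest, hrest2, dpC_cons, if_pos hv1]
          dsimp only
          have hv2 : 10 ≤ 10 * digitVal c1 + digitVal c2 := by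
            have h2 := hc2.1
            unfold digitVal
            omega
          rw [if_pos hv2]
          simp [List.map_append, List.map_map, Function.comp_def]
      · -- c1 = '0': no children, and dpA produces nothing either
        have h48 : c1.toNat = 48 := by
          have := hc1.1; omega
        have hnle : ¬ ('1' ≤ c1) := by
          intro h
          have h1 := (char_le_iff _ _).mp h
          have h1v : ('1' : Char).toNat = 49 := by decide
          omega
        have hv1 : ¬ 0 < digitVal c1 := by unfold digitVal; omega
        have hstep : stepB s [(i, acc)] = [] := by simp [stepB, hdrop, hnle]
        rw [hstep, iterStep_nil, dpC_cons, if_neg hv1]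
        rcases rest with _ | ⟨c2, rest2⟩
        · simp
        · have hc2 : isDig c2 := hd c2 ((show c2 ∈ s from List.mem_of_mem_drop (i := i) (by rw [hdrop]; exact List.mem_cons_of_mem _ List.mem_cons_self)))
          have hv2 : ¬ 10 ≤ 10 * digitVal c1 + digitVal c2 := by
            have h2 := hc2.2
            unfold digitVal
            omega
          simp [if_neg hv2]

theorem enumB_eq_dpC (s : List Char) (hd : ∀ c ∈ s, isDig c) (n : Nat) :
    enumB s n = dpC s n := by
  unfold enumB
  rw [foldl_range_iter, frontier_eq_dp s hd n 0 [] (Nat.zero_le _)]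
  simp

theorem tryA_eq (s : List Char) (hd : ∀ c ∈ s, isDig c) (fc : Int) (nc : Nat) :
    tryA s fc nc = PySem.List.min?
      ((enumB s nc).filter (fun c => c.all (fun v => decide (1 ≤ v) && decide (v ≤ fc))))
      spreadKey := by
  rw [enumB_eq_dpC s hd]
  unfold tryA dpA dpC
  cases h : dpAgo nc s with
  | none => rfl
  | some cands =>
    simp only [Option.getD_some]
    split <;> rename_i hv
    · rw [hv]; rfl
    · rfl

-- fast-path test: membership in "123456789" equals the range test, for a digit character
theorem fast_elem (c : Char) (h : isDig c) :
    (("123456789".toList).contains c) = ('1' ≤ c && c ≤ '9') := by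
  obtain ⟨h1, h2⟩ := h
  have hc : c = Char.ofNat c.toNat := (Char.ofNat_toNat c).symm
  interval_cases hn : c.toNat <;> rw [hc] <;> decide

theorem fast_eq (s : List Char) (hd : ∀ c ∈ s, isDig c) :
    (s.all (fun c => ("123456789".toList).contains c) && (decide (2 ≤ s.length) && decide (s.length ≤ 4)))
      = ((decide (2 ≤ s.length) && decide (s.length ≤ 4)) && s.all (fun c => '1' ≤ c && c ≤ '9')) := by
  rw [Bool.and_comm]
  have : s.all (fun c => ("123456789".toList).contains c) = s.all (fun c => '1' ≤ c && c ≤ '9') := by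
    induction s with
    | nil => rfl
    | cons c t ih =>
      rw [List.all_cons, List.all_cons, fast_elem c (hd c List.mem_cons_self),
        ih (fun x hx => hd x (List.mem_cons_of_mem _ hx))]
  rw [this]

theorem branch_eq (s : List Char) (hd : ∀ c ∈ s, isDig c) (fc : Int) :
    (match tryA s fc 4 with
     | some r => r
     | none =>
       match tryA s fc 3 with
       | some r => r
       | none =>
         match tryA s fc 2 with
         | some r => r
         | none => (s.filter (fun c => c ≠ '0')).map digitVal)
      = loopB s fc [4, 3, 2] := by
  simp only [loopB, tryA_eq s hd fc]

-- ===== VERDICT (by name: the statement is the Claim_ definition above) =====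
theorem parse_corners_num_py_spec : Claim_equal_parse_corners_num_py := by
  intro raw fc _hdom hpre
  unfold Spec_parse_corners_num_py parse_corners_num_py parse_corners_num_py_alt
  by_cases h0 : raw = 0
  · simp [h0]
  · rw [if_neg h0, if_neg h0]
    have hd : ∀ c ∈ PySem.Int.toChars raw, isDig c := toChars_digits raw hpre
    simp only []
    rw [fast_eq _ hd]
    split
    · rfl
    · exact branch_eq _ hd fc
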